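-- pv_equiv track=rewrite | github.com/YusufAq1/Stock-Sentiment-MVP | analysis/formatter.py | _trim_articles
-- ===== SOURCE A (Python) =====
-- from typing import Any
--
-- def _trim_articles(
--     articles: list[dict[str, Any]],
--     budget: int,
-- ) -> tuple[list[dict[str, Any]], int]:
--     """Trim news articles to fit within the character budget.
--
--     Articles are already sorted newest-first. Oldest articles (at the end
--     of the list) are removed first to preserve the most recent content.
--
--     Args:
--         articles: List of article dicts, sorted newest-first.
--         budget: Maximum character budget for all articles combined.
--
--     Returns:
--         Tuple of (trimmed_articles, number_removed).
--     """
--     serialised = _estimate_articles_size(articles)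
--     if serialised <= budget:
--         return articles, 0
--
--     removed = 0
--     while articles and _estimate_articles_size(articles) > budget:
--         articles.pop()  # remove oldest (last in list)
--         removed += 1
--
--     return articles, removed
--
-- def _estimate_articles_size(articles: list[dict[str, Any]]) -> int:
--     """Rough character count for a list of articles."""
--     total = 0
--     for a in articles:
--         total += len(a.get("title") or "") + len(a.get("summary") or "") + 80
--     return total
-- ===== SOURCE B (Python) =====
-- def _trim_articles(articles, budget):
--     """Trim articles to budget: per-article sizes computed once, then one
--     backward subtraction pass instead of re-summing the remaining list
--     after every pop. Like A, trims the input list in place."""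
--     sizes = [len(a.get("title") or "") + len(a.get("summary") or "") + 80
--              for a in articles]
--     total = sum(sizes)
--     if total <= budget:
--         return articles, 0
--     keep = len(sizes)
--     while keep and total > budget:
--         keep -= 1
--         total -= sizes[keep]
--     del articles[keep:]
--     return articles, len(sizes) - keep
-- ===== Notes on version B (the rewrite author's own statement) =====
-- stated objective: alternative
-- what changed: B computes each article's estimated size once, sums them, and walks backwards subtracting per-article sizes from the running total until it fits, instead of A's loop that re-serialises (re-sums) the whole remaining list after every pop; a timing run did not show a measurable speed-up on the generated inputs.
import Mathlib
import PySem

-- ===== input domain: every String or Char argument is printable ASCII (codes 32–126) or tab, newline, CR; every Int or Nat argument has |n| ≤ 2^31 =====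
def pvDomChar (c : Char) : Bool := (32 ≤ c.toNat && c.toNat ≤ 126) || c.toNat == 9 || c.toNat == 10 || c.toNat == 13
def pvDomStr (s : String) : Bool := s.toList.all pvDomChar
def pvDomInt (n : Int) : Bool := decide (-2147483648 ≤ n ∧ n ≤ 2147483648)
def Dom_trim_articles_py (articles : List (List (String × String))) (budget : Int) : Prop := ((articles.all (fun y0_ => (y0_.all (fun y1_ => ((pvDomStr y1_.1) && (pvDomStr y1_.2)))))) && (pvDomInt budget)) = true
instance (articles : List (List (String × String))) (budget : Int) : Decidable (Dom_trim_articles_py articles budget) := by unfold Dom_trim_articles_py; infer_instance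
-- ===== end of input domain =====

-- B replaces A's re-serialisation of the whole remaining list after every pop with one
-- per-article size pass and a backward subtraction loop (objective: alternative algorithm;
-- return-value equivalence only — both Pythons also trim the caller's list in place).

-- ===== PORT A =====
-- per-article estimated size: len(a.get("title") or "") + len(a.get("summary") or "") + 80
def pvArtSize (a : List (String × String)) : Int :=
  PySem.Str.len ((PySem.Dict.mk a).getD "title" "") +
  PySem.Str.len ((PySem.Dict.mk a).getD "summary" "") + 80

-- _estimate_articles_size: total = 0; for a in articles: total += …
def pvEstSize (articles : List (List (String × String))) : Int :=
  articles.foldl (fun total a => total + pvArtSize a) 0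

-- the while loop: while articles and _estimate_articles_size(articles) > budget: pop; removed += 1
def pvTrimLoopA (articles : List (List (String × String))) (budget : Int) (removed : Int) :
    (List (List (String × String))) × Int :=
  if articles ≠ [] ∧ pvEstSize articles > budget then
    pvTrimLoopA articles.dropLast budget (removed + 1)
  else (articles, removed)
termination_by articles.length
decreasing_by
  rename_i h
  have : articles ≠ [] := h.1
  have hl : 0 < articles.length := List.length_pos_of_ne_nil this
  simp [List.length_dropLast]
  omega

def trim_articles_py (articles : List (List (String × String))) (budget : Int) :
    (List (List (String × String))) × Int :=
  let serialised := pvEstSize articles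
  if serialised ≤ budget then (articles, 0)
  else pvTrimLoopA articles budget 0

-- ===== PORT B =====
-- while keep and total > budget: keep -= 1; total -= sizes[keep]   (returns final keep)
def pvTrimLoopB (sizes : List Int) (budget : Int) (total : Int) (keep : Nat) : Nat :=
  match keep with
  | 0 => 0
  | k + 1 =>
    if total > budget then pvTrimLoopB sizes budget (total - sizes.getD k 0) k
    else k + 1

def trim_articles_py_alt (articles : List (List (String × String))) (budget : Int) :
    (List (List (String × String))) × Int :=
  let sizes := articles.map pvArtSize
  let total := sizes.sum
  if total ≤ budget then (articles, 0)
  else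
    let keep := pvTrimLoopB sizes budget total sizes.length
    (articles.take keep, (sizes.length : Int) - keep)

-- ===== PRECONDITION & SPEC =====
def Spec_trim_articles_py (articles : List (List (String × String))) (budget : Int) (out : (List (List (String × String))) × Int) : Prop := out = trim_articles_py_alt articles budget
instance (articles : List (List (String × String))) (budget : Int) (out : (List (List (String × String))) × Int) : Decidable (Spec_trim_articles_py articles budget out) := by unfold Spec_trim_articles_py; infer_instance

-- ===== CLAIM (what is proved, stated in full; the proofs are below) =====
def Claim_equal_trim_articles_py : Prop := ∀ (articles : List (List (String × String))) (budget : Int), Dom_trim_articles_py articles budget → Spec_trim_articles_py articles budget (trim_articles_py articles budget)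

-- ===== LEMMAS AND PROOFS =====

theorem pvEstSize_eq_sum (articles : List (List (String × String))) :
    pvEstSize articles = (articles.map pvArtSize).sum := by
  simp [pvEstSize, PySem.List.foldl_add]

theorem pvEstSize_take (articles : List (List (String × String))) (k : Nat) :
    pvEstSize (articles.take k) = ((articles.map pvArtSize).take k).sum := by
  rw [pvEstSize_eq_sum, List.map_take]

-- B's loop never increases keep
theorem pvTrimLoopB_le (sizes : List Int) (budget total : Int) (keep : Nat) :
    pvTrimLoopB sizes budget total keep ≤ keep := by
  induction keep generalizing total with
  | zero => simp [pvTrimLoopB]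
  | succ k ih =>
    rw [pvTrimLoopB]
    split
    · exact le_trans (ih _) (by omega)
    · omega

-- core invariant: A's pop loop on the first k articles equals B's subtraction loop
theorem loop_agree (articles : List (List (String × String))) (budget : Int)
    (k : Nat) (hk : k ≤ articles.length) (r : Int) :
    pvTrimLoopA (articles.take k) budget r =
      (articles.take (pvTrimLoopB (articles.map pvArtSize) budget
          (((articles.map pvArtSize).take k).sum) k),
       r + ((k : Int) - pvTrimLoopB (articles.map pvArtSize) budget
          (((articles.map pvArtSize).take k).sum) k)) := by
  induction k generalizing r with
  | zero =>
    rw [pvTrimLoopA.eq_def]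
    simp [pvTrimLoopB]
  | succ k ih =>
    rw [pvTrimLoopA.eq_def]
    by_cases hgt : ((articles.map pvArtSize).take (k + 1)).sum > budget
    · have hne : articles.take (k + 1) ≠ [] := by
        have hlen : (articles.take (k + 1)).length = k + 1 := by simp; omega
        intro h
        rw [h] at hlen
        simp at hlen
      rw [if_pos ⟨hne, by rw [pvEstSize_take]; exact hgt⟩]
      have hdrop : (articles.take (k + 1)).dropLast = articles.take k := by
        have hlen : (articles.take (k + 1)).length = k + 1 := by simp; omega
        rw [List.dropLast_eq_take, hlen, List.take_take]
        congr 1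
        omega
      have hartk : articles[k]? = some articles[k] := List.getElem?_eq_getElem (by omega)
      have hsum : ((articles.map pvArtSize).take (k + 1)).sum -
          (articles.map pvArtSize).getD k 0 = ((articles.map pvArtSize).take k).sum := by
        have hk' : k < (articles.map pvArtSize).length := by simp; omega
        rw [List.getD_eq_getElem _ _ hk', List.take_add_one, List.sum_append]
        simp [hartk]
        omega
      rw [hdrop, ih (by omega) (r + 1)]
      rw [pvTrimLoopB, if_pos hgt, hsum]
      have hle := pvTrimLoopB_le (articles.map pvArtSize) budget
          (((articles.map pvArtSize).take k).sum) k
      simp only [Prod.mk.injEq, true_and]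
      push_cast
      omega
    · have hno : ¬ (articles.take (k + 1) ≠ [] ∧ pvEstSize (articles.take (k + 1)) > budget) := by
        rw [pvEstSize_take]
        tauto
      rw [if_neg hno, pvTrimLoopB, if_neg hgt]
      simp

-- ===== VERDICT (by name: the statement is the Claim_ definition above) =====
theorem trim_articles_py_spec : Claim_equal_trim_articles_py := by
  intro articles budget _
  unfold Spec_trim_articles_py trim_articles_py trim_articles_py_alt
  simp only
  rw [pvEstSize_eq_sum]
  by_cases hle : (articles.map pvArtSize).sum ≤ budget
  · rw [if_pos hle, if_pos hle]
  · rw [if_neg hle, if_neg hle]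
    have h := loop_agree articles budget articles.length (le_refl _) 0
    rw [List.take_length] at h
    have htake : ((articles.map pvArtSize).take articles.length).sum =
        (articles.map pvArtSize).sum := by
      rw [List.take_of_length_le (by simp)]
    rw [htake] at h
    rw [h]
    simp
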